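-- pv_equiv track=rewrite | github.com/Kahsolt/Huawei-Algotester-2024-Subgrahh-Isomorphism-Checker | main_networkx_impl.py | groups_to_accumulated_groups
-- ===== SOURCE A (Python) =====
-- from collections import defaultdict
-- from typing import List, Tuple, NamedTuple, Set, Dict, Union
--
-- Groups = Dict[int, Set[int]]
--
-- def groups_to_accumulated_groups(group:dict) -> Groups:
--   group_acc = defaultdict(set)
--   for deg in sorted(group):
--     nodes = group[deg]
--     for v in group_acc.values():
--       v.update(nodes)
--     group_acc[deg] = nodes
--   return group_acc
-- ===== SOURCE B (Python) =====
-- def groups_to_accumulated_groups(group: dict):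
--   items = []
--   suffix = set()
--   for deg in sorted(group, reverse=True):
--     suffix = group[deg] | suffix
--     items.append((deg, suffix))
--   return dict(reversed(items))
-- ===== Notes on version B (the rewrite author's own statement) =====
-- stated objective: alternative
-- what changed: Instead of re-scanning and updating every previously accumulated set at each degree, B makes one descending pass over the sorted degrees keeping a running union set, recording one snapshot per degree, and returns the items in ascending order.
import Mathlib
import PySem

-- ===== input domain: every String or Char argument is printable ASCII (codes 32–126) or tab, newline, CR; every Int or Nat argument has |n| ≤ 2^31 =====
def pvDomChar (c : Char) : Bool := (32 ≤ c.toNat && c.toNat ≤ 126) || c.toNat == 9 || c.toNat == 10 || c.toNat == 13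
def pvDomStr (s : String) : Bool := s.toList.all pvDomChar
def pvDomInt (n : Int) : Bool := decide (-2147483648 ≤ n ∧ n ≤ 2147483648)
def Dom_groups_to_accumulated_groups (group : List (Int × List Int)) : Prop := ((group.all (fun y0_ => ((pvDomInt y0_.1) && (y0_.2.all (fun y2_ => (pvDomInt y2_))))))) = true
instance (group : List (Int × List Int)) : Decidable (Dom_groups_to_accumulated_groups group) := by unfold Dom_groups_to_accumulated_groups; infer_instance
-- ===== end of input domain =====

-- B replaces A's per-degree update of every previously accumulated set by ONE descending
-- pass with a running union (one new set per degree), returning the same value; equality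
-- proved here is about the RETURN value only (A mutates the caller's sets in place, B does not).

-- ===== PORT A =====
-- group[deg]: deg always comes from group's keys, so the KeyError default [] is never hit
def pvNodes (group : List (Int × List Int)) (deg : Int) : List Int :=
  PySem.Set.ofList ((PySem.Dict.mk group).getD deg [])

def groups_to_accumulated_groups (group : List (Int × List Int)) : List (Int × List Int) :=
  -- for deg in sorted(group): update every accumulated set with group[deg], then append (deg, group[deg])
  (PySem.List.sorted (group.map Prod.fst) (fun k => k) false).foldl
    (fun group_acc deg =>
      let nodes := pvNodes group deg
      (group_acc.map (fun kv => (kv.1, PySem.Set.update kv.2 nodes))) ++ [(deg, nodes)])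
    []

-- ===== PORT B =====
def groups_to_accumulated_groups_alt (group : List (Int × List Int)) : List (Int × List Int) :=
  -- for deg in sorted(group, reverse=True): suffix = group[deg] | suffix; items.append((deg, suffix)); return dict(reversed(items))
  (((PySem.List.sorted (group.map Prod.fst) (fun k => k) true).foldl
    (fun (st : List (Int × List Int) × List Int) deg =>
      let suffix := PySem.Set.union (pvNodes group deg) st.2
      (st.1 ++ [(deg, suffix)], suffix))
    ([], [])).1).reverse

-- ===== PRECONDITION & SPEC =====
-- Pre_ excludes association lists with duplicate keys: those do not represent a Python dict
-- (dict construction collapses duplicates before A ever runs), so the assoc-list ports have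
-- no canonical behaviour there.
def Pre_groups_to_accumulated_groups (group : List (Int × List Int)) : Prop :=
  (group.map Prod.fst).Nodup
instance (group : List (Int × List Int)) : Decidable (Pre_groups_to_accumulated_groups group) := by
  unfold Pre_groups_to_accumulated_groups; infer_instance

def pvWitness_groups_to_accumulated_groups : (List (Int × List Int)) := [(2, [5, 6]), (1, [5, 7])]

def Spec_groups_to_accumulated_groups (group : List (Int × List Int)) (out : List (Int × List Int)) : Prop := out = groups_to_accumulated_groups_alt group
instance (group : List (Int × List Int)) (out : List (Int × List Int)) : Decidable (Spec_groups_to_accumulated_groups group out) := by unfold Spec_groups_to_accumulated_groups; infer_instance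

-- ===== CLAIM (what is proved, stated in full; the proofs are below) =====
def Claim_equal_groups_to_accumulated_groups : Prop := ∀ (group : List (Int × List Int)), Dom_groups_to_accumulated_groups group → Pre_groups_to_accumulated_groups group → Spec_groups_to_accumulated_groups group (groups_to_accumulated_groups group)

-- ===== LEMMAS AND PROOFS =====

-- concatenation of all node lists of a key list
def pvCat (group : List (Int × List Int)) (ks : List Int) : List Int :=
  (ks.map (pvNodes group)).flatten

-- the common value: entry i of the ascending key list carries the union of all later node sets
def pvSuff (group : List (Int × List Int)) : List Int → List (Int × List Int)
  | [] => []
  | d :: ks => (d, PySem.Set.update (pvNodes group d) (pvCat group ks)) :: pvSuff group ks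

theorem pv_update_ofList {s : PySem.Set Int} (b : List Int) :
    PySem.Set.update s (PySem.Set.ofList b) = PySem.Set.update s b := by
  rw [PySem.Set.update_eq_append_filter, PySem.Set.update_eq_append_filter, PySem.Set.ofList_ofList]

theorem pvA_foldl (group : List (Int × List Int)) (ks : List Int) :
    ∀ acc : List (Int × List Int),
      ks.foldl
        (fun group_acc deg =>
          let nodes := pvNodes group deg
          (group_acc.map (fun kv => (kv.1, PySem.Set.update kv.2 nodes))) ++ [(deg, nodes)])
        acc
      = acc.map (fun kv => (kv.1, PySem.Set.update kv.2 (pvCat group ks))) ++ pvSuff group ks := by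
  induction ks with
  | nil =>
    intro acc
    simp [pvSuff, pvCat, PySem.Set.update]
  | cons d ks ih =>
    intro acc
    rw [List.foldl_cons, ih]
    simp only [pvSuff, List.map_append, List.map_map, List.map_cons, List.map_nil,
      List.append_assoc, List.singleton_append]
    congr 1
    apply List.map_congr_left
    intro kv _
    simp only [Function.comp_apply]
    rw [← PySem.Set.update_append]
    simp [pvCat]

-- B's running suffix after processing the descending list rs
theorem pvB_foldl (group : List (Int × List Int)) (rs : List Int) :
    (rs.foldl
      (fun (st : List (Int × List Int) × List Int) deg =>
        let suffix := PySem.Set.union (pvNodes group deg) st.2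
        (st.1 ++ [(deg, suffix)], suffix))
      ([], []))
    = ((pvSuff group rs.reverse).reverse,
       PySem.Set.ofList (pvCat group rs.reverse)) := by
  induction rs using List.reverseRecOn with
  | nil => simp [pvSuff, pvCat, PySem.Set.ofList]
  | append_singleton rs d ih =>
    rw [List.foldl_append, ih]
    simp only [List.foldl_cons, List.foldl_nil, List.reverse_append, List.reverse_nil,
      List.nil_append, List.singleton_append, pvSuff, List.reverse_cons]
    rw [Prod.mk.injEq]
    refine ⟨?_, ?_⟩
    · rw [PySem.Set.union, pv_update_ofList]
    · rw [PySem.Set.union, pv_update_ofList]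
      have h1 : pvCat group (d :: rs.reverse) = pvNodes group d ++ pvCat group rs.reverse := by
        simp [pvCat]
      rw [h1, PySem.Set.ofList_append]
      simp [pvNodes, PySem.Set.ofList_ofList]

theorem pv_sorted_desc (xs : List Int) (h : xs.Nodup) :
    PySem.List.sorted xs (fun k => k) true = (PySem.List.sorted xs (fun k => k) false).reverse := by
  apply PySem.List.sorted_rev_eq_of_perm_of_pairwise_gt
  · exact (List.reverse_perm _).trans (PySem.List.sorted_perm xs (fun k => k) false)
  · rw [List.pairwise_reverse]
    have hle := PySem.List.sorted_pairwise xs (fun k => k)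
    have hnd : (PySem.List.sorted xs (fun k => k) false).Nodup :=
      ((PySem.List.sorted_perm xs (fun k => k) false).nodup_iff).mpr h
    have := hle.and (List.Pairwise.imp (fun {a b} hab => hab) hnd)
    exact this.imp (fun {a b} hab => lt_of_le_of_ne hab.1 hab.2)

-- ===== VERDICT (by name: the statement is the Claim_ definition above) =====
theorem groups_to_accumulated_groups_spec : Claim_equal_groups_to_accumulated_groups := by
  intro group _ hpre
  unfold Spec_groups_to_accumulated_groups
  unfold groups_to_accumulated_groups groups_to_accumulated_groups_alt
  rw [pv_sorted_desc _ hpre, pvB_foldl, pvA_foldl]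
  simp
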